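-- pv_equiv track=rewrite | github.com/mohamedsamirpassion/pilotcars-permits | app.py | get_region_by_state
-- ===== SOURCE A (Python) =====
-- def get_region_by_state(state_abbrev):
--     """Get region for a given state abbreviation"""
--     regions = {
--         'Northeast': ['ME', 'NH', 'VT', 'MA', 'RI', 'CT', 'NY', 'NJ', 'PA', 'DE', 'DC', 'MD'],
--         'Midwest': ['OH', 'MI', 'IL', 'IN', 'IA', 'MO', 'MN', 'WI', 'ND', 'SD', 'NE'],
--         'Southeast': ['AR', 'LA', 'MS', 'AL', 'FL', 'GA', 'TN', 'SC', 'NC', 'VA', 'WV', 'KY'],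
--         'Southwest': ['TX', 'OK', 'KS', 'CO', 'UT', 'NM', 'NV', 'AZ'],
--         'Pacific Northwest': ['CA', 'OR', 'WA', 'ID', 'MT', 'WY']
--     }
--
--     for region, states in regions.items():
--         if state_abbrev.upper() in states:
--             return region
--     return 'Southeast'  # Default region
-- ===== SOURCE B (Python) =====
-- # B: flat ordered state list + cumulative index thresholds instead of per-region scans.
-- _STATES = ("ME NH VT MA RI CT NY NJ PA DE DC MD "
--            "OH MI IL IN IA MO MN WI ND SD NE "
--            "AR LA MS AL FL GA TN SC NC VA WV KY "
--            "TX OK KS CO UT NM NV AZ "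
--            "CA OR WA ID MT WY").split()
-- _BOUNDS = [(12, 'Northeast'), (23, 'Midwest'), (35, 'Southeast'),
--            (43, 'Southwest'), (49, 'Pacific Northwest')]
--
--
-- def get_region_by_state(state_abbrev):
--     """Get region for a given state abbreviation"""
--     try:
--         i = _STATES.index(state_abbrev.upper())
--     except ValueError:
--         return 'Southeast'  # Default region
--     for bound, region in _BOUNDS:
--         if i < bound:
--             return region
-- ===== Notes on version B (the rewrite author's own statement) =====
-- stated objective: alternative
-- what changed: Replaces the per-region membership scan with a single flat ordered state list: one .index() lookup gives the state's position, which is mapped to its region by cumulative index thresholds (unknown states keep the 'Southeast' default).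
import Mathlib
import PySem

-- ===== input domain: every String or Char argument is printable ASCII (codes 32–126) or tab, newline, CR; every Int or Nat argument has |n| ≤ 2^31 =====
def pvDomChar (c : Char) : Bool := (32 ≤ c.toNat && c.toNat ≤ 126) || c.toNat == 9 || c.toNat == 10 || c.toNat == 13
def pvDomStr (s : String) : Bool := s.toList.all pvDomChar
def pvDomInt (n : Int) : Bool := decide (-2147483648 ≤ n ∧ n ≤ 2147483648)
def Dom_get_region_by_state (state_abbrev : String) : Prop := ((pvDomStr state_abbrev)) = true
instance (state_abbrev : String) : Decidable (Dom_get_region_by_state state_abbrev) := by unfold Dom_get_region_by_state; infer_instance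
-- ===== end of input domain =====

-- B replaces A's per-region membership scans with one flat ordered state list: a single index lookup mapped to a region via cumulative thresholds; same result.

-- ===== PORT A =====
-- the regions dict of A, in insertion order
def pvRegionsA : List (String × List String) :=
  [("Northeast", ["ME", "NH", "VT", "MA", "RI", "CT", "NY", "NJ", "PA", "DE", "DC", "MD"]),
   ("Midwest", ["OH", "MI", "IL", "IN", "IA", "MO", "MN", "WI", "ND", "SD", "NE"]),
   ("Southeast", ["AR", "LA", "MS", "AL", "FL", "GA", "TN", "SC", "NC", "VA", "WV", "KY"]),
   ("Southwest", ["TX", "OK", "KS", "CO", "UT", "NM", "NV", "AZ"]),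
   ("Pacific Northwest", ["CA", "OR", "WA", "ID", "MT", "WY"])]

-- the 'for region, states in regions.items(): if … return region' loop, with the final default
def pvLoopA (u : String) : List (String × List String) → String
  | [] => "Southeast"
  | (r, sts) :: rest => if sts.contains u then r else pvLoopA u rest

def get_region_by_state (state_abbrev : String) : String :=
  pvLoopA (PySem.Str.upper state_abbrev) pvRegionsA

-- ===== PORT B =====
-- the flat ordered state list of Source B (the split of the literal)
def pvStates : List String :=
  ["ME", "NH", "VT", "MA", "RI", "CT", "NY", "NJ", "PA", "DE", "DC", "MD",
   "OH", "MI", "IL", "IN", "IA", "MO", "MN", "WI", "ND", "SD", "NE",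
   "AR", "LA", "MS", "AL", "FL", "GA", "TN", "SC", "NC", "VA", "WV", "KY",
   "TX", "OK", "KS", "CO", "UT", "NM", "NV", "AZ",
   "CA", "OR", "WA", "ID", "MT", "WY"]

def pvBounds : List (Nat × String) :=
  [(12, "Northeast"), (23, "Midwest"), (35, "Southeast"),
   (43, "Southwest"), (49, "Pacific Northwest")]

-- 'for bound, region in _BOUNDS: if i < bound: return region'; i < 49 always, so the
-- fall-through case is unreachable (the base case value is arbitrary)
def pvPick (i : Nat) : List (Nat × String) → String
  | [] => "Southeast"
  | (b, r) :: rest => if i < b then r else pvPick i rest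

def get_region_by_state_alt (state_abbrev : String) : String :=
  match PySem.List.index? pvStates (PySem.Str.upper state_abbrev) with
  | none => "Southeast"  -- the ValueError branch
  | some i => pvPick i pvBounds

-- ===== PRECONDITION & SPEC =====
def Spec_get_region_by_state (state_abbrev : String) (out : String) : Prop := out = get_region_by_state_alt state_abbrev
instance (state_abbrev : String) (out : String) : Decidable (Spec_get_region_by_state state_abbrev out) := by unfold Spec_get_region_by_state; infer_instance

-- ===== CLAIM (what is proved, stated in full; the proofs are below) =====
def Claim_equal_get_region_by_state : Prop := ∀ (state_abbrev : String), Dom_get_region_by_state state_abbrev → Spec_get_region_by_state state_abbrev (get_region_by_state state_abbrev)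

-- ===== LEMMAS AND PROOFS =====
set_option maxRecDepth 40000 in
lemma pv_core (u : String) :
    pvLoopA u pvRegionsA =
      (match PySem.List.index? pvStates u with
       | none => "Southeast"
       | some i => pvPick i pvBounds) := by
  by_cases h : u ∈ pvStates
  · fin_cases h <;> decide
  · have hn : PySem.List.index? pvStates u = none :=
      (PySem.List.index?_eq_none_iff _ _).mpr h
    simp only [hn]
    simp [pvStates, not_or] at h
    simp [pvLoopA, pvRegionsA, List.contains_eq_mem, h]

-- ===== VERDICT (by name: the statement is the Claim_ definition above) =====
theorem get_region_by_state_spec : Claim_equal_get_region_by_state := by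
  intro s _
  unfold Spec_get_region_by_state get_region_by_state get_region_by_state_alt
  exact pv_core _
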